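-- pv_equiv track=rewrite | github.com/pasculorente/odoo-dependency-trimmer | tools/auto_clean_dependencies.py | _min_spanning_tree
-- ===== SOURCE A (Python) =====
-- from collections import defaultdict
--
-- def _first_path(hierarchy, start, end, current_path=None):
--     """
--     Finds the first path between start and end in the hierarchy tree in a read-depth search
--     :param hierarchy: the hierarchy where to look for paths
--     :param start: source module
--     :param end: target module
--     :param current_path: list of modules already visited. [start] by default
--     :return: the first path connecting start and end
--     """
--     current_path = current_path or [start]
--     if start == end:
--         return current_path
--     for dep in hierarchy.get(start, []):
--         next_path = current_path + [dep]
--         if dep == end: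
--             return next_path
--         min_path = _first_path(hierarchy, dep, end, next_path)
--         if min_path:
--             return min_path
--     return None
--
-- def _min_spanning_tree(dependency_hierarchy, modules):
--     """
--         Main algorithm: given a main tree and a list of modules, returns a minimum tree that contains the modules
--         :param dependency_hierarchy: the main hierarchy of modules, as a dict {"module": ["dep1", "dep2"], }
--         :param modules: list of modules to search in the tree
--         :return: a dict in the same format as dependency_hierarchy, that contains the minimum relations to contain all
--         modules
--         """
--     module_list = list(modules)
--     all_paths = []
--     for i in range(len(module_list)):
--         for j in range(len(module_list)):
--             if i != j:
--                 # Find the first path from i to j (i - * -> j)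
--                 min_path = _first_path(dependency_hierarchy, module_list[i], module_list[j])
--                 if min_path:
--                     all_paths.append(min_path)
--     rtn = defaultdict(set)
--     rtn.update({x: set() for x in modules})
--     for min_path in all_paths:
--         for i in range(len(min_path) - 1):
--             rtn[min_path[i]].add(min_path[i + 1])
--     return rtn
-- ===== SOURCE B (Python) =====
-- from collections import defaultdict
--
-- def _collect(hierarchy, targets, node, path, paths):
--     """Depth-first traversal recording, for every node reached, the path by
--     which it is first reached; stops once every target has a recorded path."""
--     if all(t in paths for t in targets):
--         return
--     for dep in hierarchy.get(node, []):
--         next_path = path + [dep]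
--         if dep not in paths:
--             paths[dep] = next_path
--         _collect(hierarchy, targets, dep, next_path, paths)
--
-- def _min_spanning_tree(dependency_hierarchy, modules):
--     module_list = list(modules)
--     edges = defaultdict(set)
--     edges.update({x: set() for x in modules})
--     for i, source in enumerate(module_list):
--         paths = {source: [source]}
--         _collect(dependency_hierarchy, module_list, source, [source], paths)
--         for j, target in enumerate(module_list):
--             if i != j:
--                 path = paths.get(target)
--                 if path:
--                     for u, v in zip(path, path[1:]):
--                         edges[u].add(v)
--     return edges
-- ===== Notes on version B (the rewrite author's own statement) =====
-- stated objective: alternative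
-- what changed: Instead of running A's recursive first-path search once per ordered pair of modules, B does one depth-first traversal per source module that records the first path reaching every node (stopping once all modules are recorded), turns the inner target loop into dict lookups, and builds the edge dict directly while iterating instead of materialising an all_paths list.
-- outside the precondition, e.g. on _min_spanning_tree({'a': ['a']}, ['a']): A returns {'a': set()}, B returns {'a': set()}
import Mathlib
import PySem

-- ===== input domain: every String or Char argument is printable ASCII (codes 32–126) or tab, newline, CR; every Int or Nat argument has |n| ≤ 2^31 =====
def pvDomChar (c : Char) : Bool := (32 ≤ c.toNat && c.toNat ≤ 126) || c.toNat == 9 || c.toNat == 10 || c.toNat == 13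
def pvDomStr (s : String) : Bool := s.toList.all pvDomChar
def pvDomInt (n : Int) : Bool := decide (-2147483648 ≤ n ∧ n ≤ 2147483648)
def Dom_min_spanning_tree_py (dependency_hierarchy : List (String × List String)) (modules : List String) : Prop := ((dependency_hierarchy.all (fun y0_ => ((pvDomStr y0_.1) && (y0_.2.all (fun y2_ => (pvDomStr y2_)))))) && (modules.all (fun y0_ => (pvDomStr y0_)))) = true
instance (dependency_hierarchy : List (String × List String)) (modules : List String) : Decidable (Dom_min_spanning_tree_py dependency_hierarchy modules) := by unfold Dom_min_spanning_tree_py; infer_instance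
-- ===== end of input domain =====

-- B replaces A's recursive first-path search per ordered module pair by ONE path-recording
-- depth-first traversal per source (stopping once every module has a recorded path) and builds
-- the edge dict directly while iterating instead of materialising an all_paths list.

-- ===== PORT A =====
-- _first_path, transliterated. Python has no fuel; the fuel argument only bounds the recursion
-- depth, and under Pre_ (no cycle reachable from the modules) the depth used at the call site
-- (dependency_hierarchy.length + 1) is never exhausted, so the port computes what Python computes.
mutual
def pvFirstPath (h : PySem.Dict String (List String)) : Nat → String → String → List String → Option (List String)
  | 0, _, _, _ => none
  | fuel+1, start, end_, cur =>
      if start == end_ then some cur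
      else pvFpGo h fuel (h.getD start []) end_ cur
  termination_by n _ _ _ => (n, 0)
-- the 'for dep in hierarchy.get(start, [])' loop of _first_path
def pvFpGo (h : PySem.Dict String (List String)) : Nat → List String → String → List String → Option (List String)
  | _, [], _, _ => none
  | fuel, dep :: rest, end_, cur =>
      let next_path := cur ++ [dep]
      if dep == end_ then some next_path
      else match pvFirstPath h fuel dep end_ next_path with
           | some p => if p.isEmpty then pvFpGo h fuel rest end_ cur else some p  -- 'if min_path:' (truthiness)
           | none => pvFpGo h fuel rest end_ cur
  termination_by n l _ _ => (n, l.length + 1)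
end

-- the tail of A's _min_spanning_tree: rtn = defaultdict(set); rtn.update({x: set() for x in modules}); edge loop
def pvBuildTreeA (modules : List String) (allPaths : List (List String)) : List (String × List String) :=
  let rtn0 : PySem.Dict String (PySem.Set String) :=
    modules.foldl (fun d x => d.insert x PySem.Set.empty) PySem.Dict.empty
  let rtn := allPaths.foldl (fun d p =>
      (PySem.List.pyRange 0 ((p.length : Int) - 1) 1).foldl (fun d i =>
        d.modify (PySem.List.pyGetD p i "") PySem.Set.empty
          (fun s => PySem.Set.add s (PySem.List.pyGetD p (i+1) ""))) d) rtn0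
  rtn.items

def min_spanning_tree_py (dependency_hierarchy : List (String × List String)) (modules : List String) : List (String × List String) :=
  let h := PySem.Dict.ofList dependency_hierarchy
  let ml := modules               -- module_list = list(modules)
  let fuel := dependency_hierarchy.length + 1
  let allPaths := (PySem.List.pyRange 0 (ml.length : Int) 1).foldl (fun acc i =>
      (PySem.List.pyRange 0 (ml.length : Int) 1).foldl (fun acc j =>
        if i ≠ j then
          -- _first_path(dependency_hierarchy, module_list[i], module_list[j]); default current_path -> [start]
          match pvFirstPath h fuel (PySem.List.pyGetD ml i "") (PySem.List.pyGetD ml j "")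
              [PySem.List.pyGetD ml i ""] with
          | some p => if p.isEmpty then acc else acc ++ [p]  -- 'if min_path:'
          | none => acc
        else acc) acc) ([] : List (List String))
  pvBuildTreeA modules allPaths

-- ===== PORT B =====
-- _collect, transliterated (fuel as for pvFirstPath; same bound, same Pre_): a depth-first
-- traversal recording the first path reaching each node, stopping once all targets are recorded.
-- The 'for dep in hierarchy.get(node, [])' loop is a foldl over the dependency list.
def pvCollect (h : PySem.Dict String (List String)) (targets : List String) : Nat → String → List String → PySem.Dict String (List String) → PySem.Dict String (List String)
  | 0, _, _, paths => paths
  | fuel+1, node, path, paths =>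
      if targets.all (fun t => paths.contains t) then paths  -- 'if all(t in paths for t in targets): return'
      else
        (h.getD node []).foldl (fun paths dep =>
          let next_path := path ++ [dep]
          let paths1 := if paths.contains dep then paths else paths.insert dep next_path
          pvCollect h targets fuel dep next_path paths1) paths

-- 'for u, v in zip(path, path[1:]): edges[u].add(v)'
def pvAddEdges (d : PySem.Dict String (PySem.Set String)) (p : List String) : PySem.Dict String (PySem.Set String) :=
  (p.zip (PySem.List.slice p (some 1) none)).foldl
    (fun d uv => d.modify uv.1 PySem.Set.empty (fun s => PySem.Set.add s uv.2)) d

def min_spanning_tree_py_alt (dependency_hierarchy : List (String × List String)) (modules : List String) : List (String × List String) :=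
  let h := PySem.Dict.ofList dependency_hierarchy
  let ml := modules
  let fuel := dependency_hierarchy.length + 1
  let edges0 : PySem.Dict String (PySem.Set String) :=
    modules.foldl (fun d x => d.insert x PySem.Set.empty) PySem.Dict.empty
  let edges := (PySem.List.enumerate ml 0).foldl (fun d is =>
      -- paths = {source: [source]}; _collect(dependency_hierarchy, module_list, source, [source], paths)
      let paths := pvCollect h ml fuel is.2 [is.2] (PySem.Dict.empty.insert is.2 [is.2])
      (PySem.List.enumerate ml 0).foldl (fun d jt =>
        if is.1 ≠ jt.1 then
          match paths.get? jt.2 with        -- paths.get(target)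
          | some p => if p.isEmpty then d else pvAddEdges d p  -- 'if path:'
          | none => d
        else d) d) edges0
  edges.items

-- ===== PRECONDITION & SPEC =====
def pvReachStep (h : PySem.Dict String (List String)) (S : PySem.Set String) : PySem.Set String :=
  PySem.Set.update S (S.flatMap (fun u => h.getD u []))

def pvReachClose (h : PySem.Dict String (List String)) : Nat → PySem.Set String → PySem.Set String
  | 0, S => S
  | n+1, S => pvReachClose h n (pvReachStep h S)

-- Pre_ excludes hierarchies with a dependency cycle reachable from one of the modules: there A's
-- unbounded recursive searches raise RecursionError on all but the few inputs whose searches all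
-- stop before entering the cycle, and on those few B returns the same value as A (its traversals
-- stop once every module has a recorded path) — only the equivalence proof does not cover them.
def Pre_min_spanning_tree_py (dependency_hierarchy : List (String × List String)) (modules : List String) : Prop :=
  (let h := PySem.Dict.ofList dependency_hierarchy;
   let K := dependency_hierarchy.length + (dependency_hierarchy.map (fun p => p.2.length)).sum;
   let R := pvReachClose h K (PySem.Set.ofList modules);
   R.all (fun u => !(PySem.Set.contains (pvReachClose h K (PySem.Set.ofList (h.getD u []))) u))) = true

instance (dependency_hierarchy : List (String × List String)) (modules : List String) : Decidable (Pre_min_spanning_tree_py dependency_hierarchy modules) := by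
  unfold Pre_min_spanning_tree_py; infer_instance

def pvWitness_min_spanning_tree_py : (List (String × List String)) × List String :=
  ([("a", ["b"]), ("b", ["c"])], ["a", "c"])

def Spec_min_spanning_tree_py (dependency_hierarchy : List (String × List String)) (modules : List String) (out : List (String × List String)) : Prop := out = min_spanning_tree_py_alt dependency_hierarchy modules
instance (dependency_hierarchy : List (String × List String)) (modules : List String) (out : List (String × List String)) : Decidable (Spec_min_spanning_tree_py dependency_hierarchy modules out) := by unfold Spec_min_spanning_tree_py; infer_instance

-- ===== CLAIM (what is proved, stated in full; the proofs are below) =====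
def Claim_equal_min_spanning_tree_py : Prop := ∀ (dependency_hierarchy : List (String × List String)) (modules : List String), Dom_min_spanning_tree_py dependency_hierarchy modules → Pre_min_spanning_tree_py dependency_hierarchy modules → Spec_min_spanning_tree_py dependency_hierarchy modules (min_spanning_tree_py dependency_hierarchy modules)

-- ===== LEMMAS AND PROOFS =====

lemma pvFpGo_ne_nil (h : PySem.Dict String (List String)) (n : Nat) :
    ∀ (ds : List String) (e : String) (cur q : List String),
      pvFpGo h n ds e cur = some q → q ≠ [] := by
  intro ds
  induction ds with
  | nil => intro e cur q hq; simp [pvFpGo] at hq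
  | cons dep rest ih =>
    intro e cur q hq
    rw [pvFpGo] at hq
    by_cases hde : (dep == e) = true
    · simp only [hde, if_pos] at hq
      cases hq; simp
    · simp only [hde] at hq
      rw [if_neg (by simp_all)] at hq
      cases hfp : pvFirstPath h n dep e (cur ++ [dep]) with
      | none => rw [hfp] at hq; exact ih e cur q hq
      | some p =>
        rw [hfp] at hq
        by_cases hpe : p.isEmpty
        · simp only [hpe, if_pos] at hq; exact ih e cur q hq
        · simp only [hpe, Bool.false_eq_true, if_false] at hq; cases hq
          simpa [List.isEmpty_iff] using hpe

-- what pvCollect at fuel n records for e, phrased from A's side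
def pvFPbody (h : PySem.Dict String (List String)) (n : Nat) (u e : String) (p : List String) : Option (List String) :=
  match n with
  | 0 => none
  | m+1 => pvFpGo h m (h.getD u []) e p

lemma pvFirstPath_eq_body (h : PySem.Dict String (List String)) (n : Nat) (u e : String) (p : List String)
    (hne : u ≠ e) : pvFirstPath h n u e p = pvFPbody h n u e p := by
  cases n with
  | zero => rw [pvFirstPath]; rfl
  | succ m => rw [pvFirstPath, if_neg (by simpa using hne)]; rfl

lemma pvFPbody_ne_nil (h : PySem.Dict String (List String)) (n : Nat) (u e : String) (p q : List String)
    (hq : pvFPbody h n u e p = some q) : q ≠ [] := by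
  cases n with
  | zero => simp [pvFPbody] at hq
  | succ m => exact pvFpGo_ne_nil h m _ e p q hq

lemma pvGetD1 (D : PySem.Dict String (List String)) (dep e : String) (np : List String) :
    ((if D.contains dep then D else D.insert dep np).get? e)
      = if e = dep then (if D.contains dep then D.get? dep else some np) else D.get? e := by
  by_cases hdD : D.contains dep
  · simp [hdD]; intro he; subst he; rfl
  · simp [hdD, PySem.Dict.get?_insert]

-- proof-side spelling of pvCollect's foldl over the dependency list
def pvColGo (h : PySem.Dict String (List String)) (targets : List String) (fuel : Nat) : List String → List String → PySem.Dict String (List String) → PySem.Dict String (List String)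
  | [], _, paths => paths
  | dep :: rest, path, paths =>
      let next_path := path ++ [dep]
      let paths1 := if paths.contains dep then paths else paths.insert dep next_path
      pvColGo h targets fuel rest path (pvCollect h targets fuel dep next_path paths1)

lemma pvColGo_eq_foldl (h : PySem.Dict String (List String)) (targets : List String) (fuel : Nat) :
    ∀ (ds path : List String) (paths : PySem.Dict String (List String)),
      ds.foldl (fun paths dep =>
          let next_path := path ++ [dep]
          let paths1 := if paths.contains dep then paths else paths.insert dep next_path
          pvCollect h targets fuel dep next_path paths1) paths
        = pvColGo h targets fuel ds path paths := by
  intro ds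
  induction ds with
  | nil => intro path paths; rfl
  | cons dep rest ih => intro path paths; rw [List.foldl_cons, pvColGo, ih]

lemma pvColGo_step (h : PySem.Dict String (List String)) (targets : List String) (e : String) (n : Nat)
    (hcol : ∀ u p D, (pvCollect h targets n u p D).get? e = if D.contains e then D.get? e else pvFPbody h n u e p) :
    ∀ (ds p : List String) (D : PySem.Dict String (List String)),
      (pvColGo h targets n ds p D).get? e = if D.contains e then D.get? e else pvFpGo h n ds e p := by
  intro ds
  induction ds with
  | nil =>
    intro p D
    rw [pvColGo, pvFpGo]
    split_ifs with hc
    · rfl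
    · exact (PySem.Dict.get?_eq_none_iff_contains D e).mpr (by simpa using hc)
  | cons dep rest ih =>
    intro p D
    rw [pvColGo]
    set np := p ++ [dep] with hnp
    set D1 := if D.contains dep then D else D.insert dep np with hD1
    set A2 := pvCollect h targets n dep np D1 with hA2
    rw [ih]
    have hA2get := hcol dep np D1
    have hD1get : D1.get? e = if e = dep then (if D.contains dep then D.get? dep else some np) else D.get? e :=
      pvGetD1 D dep e np
    have hRHS : pvFpGo h n (dep :: rest) e p
        = if dep == e then some np
          else match pvFirstPath h n dep e np with
               | some q => if q.isEmpty then pvFpGo h n rest e p else some q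
               | none => pvFpGo h n rest e p := by
      rw [pvFpGo]
    rw [hRHS]
    by_cases hce : D.contains e = true
    · have hDe : (D.get? e).isSome = true := by rw [← PySem.Dict.contains_eq_isSome_get?]; exact hce
      have hD1e : D1.get? e = D.get? e := by
        rcases eq_or_ne e dep with hed | hed
        · subst hed; simp [hD1get, hce]
        · simp [hD1get, hed]
      have hc1 : D1.contains e = true := by rw [PySem.Dict.contains_eq_isSome_get?, hD1e]; exact hDe
      have hA2e : A2.get? e = D.get? e := by rw [hA2get, if_pos hc1, hD1e]
      have hA2c : A2.contains e = true := by rw [PySem.Dict.contains_eq_isSome_get?, hA2e]; exact hDe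
      rw [if_pos hA2c, if_pos hce, hA2e]
    · have hDe : D.get? e = none := (PySem.Dict.get?_eq_none_iff_contains D e).mpr (by simpa using hce)
      rw [if_neg hce]
      rcases eq_or_ne dep e with hde | hde
      · subst hde
        have hcd : D.contains dep = false := by simpa using hce
        have hD1e : D1.get? dep = some np := by simp [hD1get, hcd]
        have hc1 : D1.contains dep = true := by rw [PySem.Dict.contains_eq_isSome_get?, hD1e]; rfl
        have hA2e : A2.get? dep = some np := by rw [hA2get, if_pos hc1, hD1e]
        have hA2c : A2.contains dep = true := by rw [PySem.Dict.contains_eq_isSome_get?, hA2e]; rfl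
        rw [if_pos hA2c, hA2e, if_pos (by simp)]
      · have hD1e : D1.get? e = none := by simp [hD1get, Ne.symm hde, hDe]
        have hc1 : D1.contains e = false := by rw [PySem.Dict.contains_eq_isSome_get?, hD1e]; rfl
        have hA2e : A2.get? e = pvFirstPath h n dep e np := by
          rw [hA2get, if_neg (by simp [hc1]), ← pvFirstPath_eq_body h n dep e np hde]
        rw [if_neg (show ¬((dep == e) = true) by simpa using hde)]
        cases hr : pvFirstPath h n dep e np with
        | none =>
          have hA2c : A2.contains e = false := by
            rw [PySem.Dict.contains_eq_isSome_get?, hA2e, hr]; rfl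
          rw [if_neg (by simp [hA2c])]
        | some q =>
          have hqne : q ≠ [] := by
            apply pvFPbody_ne_nil h n dep e np q
            rw [← pvFirstPath_eq_body h n dep e np hde]; exact hr
          have hA2c : A2.contains e = true := by
            rw [PySem.Dict.contains_eq_isSome_get?, hA2e, hr]; rfl
          rw [if_pos hA2c, hA2e, hr]
          simp [hqne]

lemma pvCollect_get_gen (h : PySem.Dict String (List String)) (targets : List String) (e : String)
    (he : e ∈ targets) :
    ∀ (n : Nat) (u : String) (p : List String) (D : PySem.Dict String (List String)),
      (pvCollect h targets n u p D).get? e = if D.contains e then D.get? e else pvFPbody h n u e p := by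
  intro n
  induction n with
  | zero =>
    intro u p D
    rw [pvCollect]
    split_ifs with hc
    · rfl
    · exact (PySem.Dict.get?_eq_none_iff_contains D e).mpr (by simpa using hc)
  | succ m ihm =>
    intro u p D
    rw [pvCollect]
    by_cases hstop : targets.all (fun t => D.contains t) = true
    · rw [if_pos hstop]
      have hce : D.contains e = true := by
        have := List.all_eq_true.mp hstop e he
        simpa using this
      rw [if_pos hce]
    · rw [if_neg hstop, pvColGo_eq_foldl, pvColGo_step h targets e m (fun u p D => ihm u p D)]
      rfl

lemma pvCollect_get (h : PySem.Dict String (List String)) (targets : List String) (k : Nat) (s t : String)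
    (ht : t ∈ targets) :
    (pvCollect h targets (k+1) s [s] (PySem.Dict.empty.insert s [s])).get? t
      = pvFirstPath h (k+1) s t [s] := by
  rw [pvCollect_get_gen h targets t ht, pvFirstPath]
  rcases eq_or_ne t s with hts | hts
  · subst hts
    rw [if_pos (by rw [PySem.Dict.contains_eq_isSome_get?, PySem.Dict.get?_insert_self]; rfl)]
    rw [if_pos (by simp), PySem.Dict.get?_insert_self]
  · rw [if_neg (show ¬((s == t) = true) by simpa using (Ne.symm hts))]
    rw [if_neg (by rw [PySem.Dict.contains_insert]; simp [hts, PySem.Dict.contains_empty])]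
    rfl

lemma pvFirstPath_ne_nil (h : PySem.Dict String (List String)) (k : Nat) (s t : String) (q : List String)
    (hq : pvFirstPath h (k+1) s t [s] = some q) : q ≠ [] := by
  rw [pvFirstPath] at hq
  by_cases hst : (s == t) = true
  · rw [if_pos hst] at hq; cases hq; simp
  · rw [if_neg hst] at hq; exact pvFpGo_ne_nil h k _ t [s] q hq

-- folding a consumer over a fold-built list = fusing the consumer into the builder
lemma pvFoldlFlatMap {ι π δ : Type} (step : δ → π → δ) :
    ∀ (l : List ι) (g : ι → List π) (d : δ),
      (l.flatMap g).foldl step d = l.foldl (fun d x => (g x).foldl step d) d := by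
  intro l
  induction l with
  | nil => intro g d; simp
  | cons x rest ih => intro g d; simp [List.flatMap_cons, List.foldl_append, ih]

-- per-path edge loop: index form (A) = zip form (B), Nat-range version
lemma pvEdgeFoldNat {δ : Type} (g : δ → String → String → δ) :
    ∀ (p : List String) (d : δ),
      (List.range (p.length - 1)).foldl (fun d k => g d (p.getD k "") (p.getD (k+1) "")) d
        = (p.zip p.tail).foldl (fun d uv => g d uv.1 uv.2) d := by
  intro p
  induction p with
  | nil => intro d; simp
  | cons u t ih =>
    intro d
    cases t with
    | nil => simp
    | cons v t' =>
      have hlen : (u :: v :: t').length - 1 = ((v :: t').length - 1) + 1 := by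
        simp [List.length_cons]
      rw [hlen, List.range_succ_eq_map, List.foldl_cons, List.foldl_map]
      simpa using ih (g d u v)

-- per-path edge loop: A's pyRange/pyGetD form = B's zip form
lemma pvEdgeFold {δ : Type} (g : δ → String → String → δ) (p : List String) (d : δ) :
    (PySem.List.pyRange 0 ((p.length : Int) - 1) 1).foldl
        (fun d i => g d (PySem.List.pyGetD p i "") (PySem.List.pyGetD p (i+1) "")) d
      = (p.zip p.tail).foldl (fun d uv => g d uv.1 uv.2) d := by
  rw [PySem.List.pyRange_one, List.foldl_map, ← pvEdgeFoldNat g p d]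
  have hn : ((p.length : Int) - 1 - 0).toNat = p.length - 1 := by omega
  rw [hn]
  apply PySem.List.foldl_congr_mem
  intro d k hk
  have h1 : ((0 : Int) + (k : Int)) = ((k : Nat) : Int) := by omega
  have h2 : ((0 : Int) + (k : Int)) + 1 = (((k + 1 : Nat)) : Int) := by push_cast; omega
  rw [h2, h1, PySem.List.pyGetD_natCast, PySem.List.pyGetD_natCast]

-- the list of paths A's pair (i, j) contributes to all_paths (proof-side notation)
def pvPairPaths (h : PySem.Dict String (List String)) (fuel : Nat) (ml : List String) (i j : Int) : List (List String) :=
  if i ≠ j then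
    match pvFirstPath h fuel (PySem.List.pyGetD ml i "") (PySem.List.pyGetD ml j "")
        [PySem.List.pyGetD ml i ""] with
    | some p => if p.isEmpty then [] else [p]
    | none => []
  else []

lemma pvGetD_mem (ml : List String) (j : Int) (hj : j ∈ PySem.List.pyRange 0 (ml.length : Int) 1) :
    PySem.List.pyGetD ml j "" ∈ ml := by
  obtain ⟨h0, hlt⟩ := PySem.List.mem_pyRange_one.mp hj
  rw [PySem.List.pyGetD_of_nonneg ml "" h0,
      List.getD_eq_getElem ml "" (by omega : j.toNat < ml.length)]
  exact List.getElem_mem _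

-- ===== VERDICT (by name: the statement is the Claim_ definition above) =====
theorem min_spanning_tree_py_spec : Claim_equal_min_spanning_tree_py := by
  intro dh modules _dom _pre
  unfold Spec_min_spanning_tree_py
  unfold min_spanning_tree_py min_spanning_tree_py_alt pvBuildTreeA
  dsimp only
  congr 1
  set h := PySem.Dict.ofList dh with hh
  set ml := modules with hml
  set k := dh.length with hk
  set stepA : PySem.Dict String (PySem.Set String) → List String → PySem.Dict String (PySem.Set String) :=
    fun d p => (PySem.List.pyRange 0 ((p.length : Int) - 1) 1).foldl (fun d i =>
        d.modify (PySem.List.pyGetD p i "") PySem.Set.empty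
          (fun s => PySem.Set.add s (PySem.List.pyGetD p (i+1) ""))) d with hstepA
  set rtn0 : PySem.Dict String (PySem.Set String) :=
    ml.foldl (fun d x => d.insert x PySem.Set.empty) PySem.Dict.empty with hrtn0
  -- A's all_paths, as a flatMap over the index pairs
  have hinner : ∀ (i : Int) (acc : List (List String)),
      (PySem.List.pyRange 0 (ml.length : Int) 1).foldl (fun acc j =>
        if i ≠ j then
          match pvFirstPath h (k+1) (PySem.List.pyGetD ml i "") (PySem.List.pyGetD ml j "")
              [PySem.List.pyGetD ml i ""] with
          | some p => if p.isEmpty then acc else acc ++ [p]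
          | none => acc
        else acc) acc
      = acc ++ (PySem.List.pyRange 0 (ml.length : Int) 1).flatMap (pvPairPaths h (k+1) ml i) := by
    intro i acc
    rw [PySem.List.foldl_congr_mem _ _ (fun acc j => acc ++ pvPairPaths h (k+1) ml i j) _ ?_,
        PySem.List.foldl_append_eq_flatMap]
    intro acc j _
    dsimp only
    unfold pvPairPaths
    by_cases hij : i ≠ j
    · rw [if_pos hij, if_pos hij]
      cases pvFirstPath h (k+1) (PySem.List.pyGetD ml i "") (PySem.List.pyGetD ml j "")
          [PySem.List.pyGetD ml i ""] with
      | none => simp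
      | some p =>
        by_cases hpe : p.isEmpty
        · simp [hpe]
        · simp [hpe]
    · rw [if_neg hij, if_neg hij]; simp
  have hAP : (PySem.List.pyRange 0 (ml.length : Int) 1).foldl (fun acc i =>
      (PySem.List.pyRange 0 (ml.length : Int) 1).foldl (fun acc j =>
        if i ≠ j then
          match pvFirstPath h (k+1) (PySem.List.pyGetD ml i "") (PySem.List.pyGetD ml j "")
              [PySem.List.pyGetD ml i ""] with
          | some p => if p.isEmpty then acc else acc ++ [p]
          | none => acc
        else acc) acc) ([] : List (List String))
      = (PySem.List.pyRange 0 (ml.length : Int) 1).flatMap (fun i =>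
          (PySem.List.pyRange 0 (ml.length : Int) 1).flatMap (pvPairPaths h (k+1) ml i)) := by
    rw [PySem.List.foldl_congr_mem _ _
        (fun acc i => acc ++ (PySem.List.pyRange 0 (ml.length : Int) 1).flatMap (pvPairPaths h (k+1) ml i)) _
        (fun acc i _ => hinner i acc),
        PySem.List.foldl_append_eq_flatMap]
    simp
  rw [hAP, pvFoldlFlatMap, ]
  -- B's enumerate folds, as pyRange folds over (index, value) pairs
  rw [show PySem.List.enumerate ml 0 = PySem.List.enumerate ml from rfl,
      PySem.List.enumerate_eq_map_pyRange ml "", PySem.List.len_eq,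
      List.foldl_map]
  apply PySem.List.foldl_congr_mem
  intro d i hi
  rw [pvFoldlFlatMap, List.foldl_map]
  apply PySem.List.foldl_congr_mem
  intro d2 j hj
  dsimp only
  have htmem : PySem.List.pyGetD ml j "" ∈ ml := pvGetD_mem ml j hj
  unfold pvPairPaths
  by_cases hij : i ≠ j
  · rw [if_pos hij, if_pos hij,
        pvCollect_get h ml k (PySem.List.pyGetD ml i "") (PySem.List.pyGetD ml j "") htmem]
    cases hr : pvFirstPath h (k+1) (PySem.List.pyGetD ml i "") (PySem.List.pyGetD ml j "")
        [PySem.List.pyGetD ml i ""] with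
    | none => simp
    | some p =>
      have hpne : p ≠ [] := pvFirstPath_ne_nil h k _ _ p hr
      have hpe : p.isEmpty = false := by simpa [List.isEmpty_iff] using hpne
      dsimp only
      simp only [hpe, Bool.false_eq_true, if_false, List.foldl_cons, List.foldl_nil]
      unfold pvAddEdges
      rw [PySem.List.slice_from_one]
      exact pvEdgeFold (fun d u v => d.modify u PySem.Set.empty (fun s => PySem.Set.add s v)) p d2
  · rw [if_neg hij, if_neg hij]; rfl
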